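-- pv_equiv track=rewrite | github.com/FAIRChemistry/software-driven-rdm | sdRDM/generator/updater.py | extract_constants
-- ===== SOURCE A (Python) =====
-- from typing import List, Tuple
--
-- def extract_constants(custom_class: List[str]) -> str:
--     """Extracts constants from a custom class. This includes all statements except
--     import statements before the class definition
--
--     Args:
--         custom_class (List[str]): List of strings representing the generated code
--
--     Returns:
--         str: Import statements as a string
--     """
--
--     constants = []
--     for line in custom_class:
--         line = line.strip()
--
--         if line.startswith("@") or line.startswith("class"):
--             constants.append("\n")
--             return "".join(constants)
--         elif line.startswith("from") or line.startswith("import"):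
--             continue
--         else:
--             constants.append(line)
--
--     return ""
-- ===== SOURCE B (Python) =====
-- def extract_constants(custom_class):
--     idx = next((i for i, line in enumerate(custom_class)
--                 if line.strip().startswith("@") or line.strip().startswith("class")), None)
--     if idx is None:
--         return ""
--     kept = [s for s in (line.strip() for line in custom_class[:idx])
--             if not (s.startswith("from") or s.startswith("import"))]
--     return "".join(kept) + "\n"
-- ===== Notes on version B (the rewrite author's own statement) =====
-- stated objective: simpler
-- what changed: B replaces A's single accumulating loop with early return by a locate-the-terminator step (first line whose strip starts with '@' or 'class') followed by a filter-and-join over the prefix slice; no accumulator is threaded.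
import Mathlib
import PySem

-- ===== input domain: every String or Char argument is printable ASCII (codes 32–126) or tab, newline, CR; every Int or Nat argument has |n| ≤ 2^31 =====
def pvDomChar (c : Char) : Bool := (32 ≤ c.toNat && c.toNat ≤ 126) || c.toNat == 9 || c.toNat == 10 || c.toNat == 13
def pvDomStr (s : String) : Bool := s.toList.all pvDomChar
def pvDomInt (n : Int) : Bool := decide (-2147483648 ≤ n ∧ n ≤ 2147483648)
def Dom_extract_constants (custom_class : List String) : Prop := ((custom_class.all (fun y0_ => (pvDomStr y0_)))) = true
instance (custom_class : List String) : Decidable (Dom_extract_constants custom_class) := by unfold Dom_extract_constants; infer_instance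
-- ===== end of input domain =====

-- B locates the first terminator line then filters/joins the prefix slice, instead of A's single accumulating loop; objective: simpler.

-- ===== PORT A =====
-- the for-loop with accumulator `constants` and early return
def extractLoopA : List String → List String → String
  | _constants, [] => ""
  | constants, l :: rest =>
    let line := PySem.Str.strip l
    if PySem.Str.startswith line "@" || PySem.Str.startswith line "class" then
      PySem.Str.join "" (constants ++ ["\n"])
    else if PySem.Str.startswith line "from" || PySem.Str.startswith line "import" then
      extractLoopA constants rest
    else
      extractLoopA (constants ++ [line]) rest

def extract_constants (custom_class : List String) : String :=
  extractLoopA [] custom_class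

-- ===== PORT B =====
def isTerminator (l : String) : Bool :=
  PySem.Str.startswith (PySem.Str.strip l) "@" || PySem.Str.startswith (PySem.Str.strip l) "class"

def isImportLine (s : String) : Bool :=
  PySem.Str.startswith s "from" || PySem.Str.startswith s "import"

def extract_constants_alt (custom_class : List String) : String :=
  match custom_class.findIdx? isTerminator with
  | none => ""
  | some i =>
    let kept := ((custom_class.take i).map PySem.Str.strip).filter (fun s => !isImportLine s)
    PySem.Str.join "" kept ++ "\n"

-- ===== PRECONDITION & SPEC =====
def Spec_extract_constants (custom_class : List String) (out : String) : Prop := out = extract_constants_alt custom_class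
instance (custom_class : List String) (out : String) : Decidable (Spec_extract_constants custom_class out) := by unfold Spec_extract_constants; infer_instance

-- ===== CLAIM (what is proved, stated in full; the proofs are below) =====
def Claim_equal_extract_constants : Prop := ∀ (custom_class : List String), Dom_extract_constants custom_class → Spec_extract_constants custom_class (extract_constants custom_class)

-- ===== LEMMAS AND PROOFS =====

theorem inter_nil (xs : List (List Char)) : List.intercalate [] xs = xs.flatten := by
  induction xs with
  | nil => simp [List.intercalate]
  | cons x xs ih =>
    cases xs with
    | nil => simp [List.intercalate]
    | cons y ys => simp_all [List.intercalate, List.intersperse]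

theorem join_empty_append (xs ys : List String) :
    PySem.Str.join "" (xs ++ ys) = PySem.Str.join "" xs ++ PySem.Str.join "" ys := by
  simp only [PySem.Str.join, PySem.Chars.join, String.toList_empty, inter_nil, List.map_append,
    List.flatten_append]
  rw [← String.ofList_append]

theorem extractLoopA_char (acc : List String) (ls : List String) :
    extractLoopA acc ls =
      match ls.findIdx? isTerminator with
      | none => ""
      | some i =>
        PySem.Str.join "" (acc ++ ((ls.take i).map PySem.Str.strip).filter (fun s => !isImportLine s) ++ ["\n"]) := by
  induction ls generalizing acc with
  | nil => simp [extractLoopA]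
  | cons l rest ih =>
    rw [List.findIdx?_cons]
    by_cases ht : isTerminator l
    · have ht2 : (PySem.Str.startswith (PySem.Str.strip l) "@" ||
          PySem.Str.startswith (PySem.Str.strip l) "class") = true := by
        unfold isTerminator at ht; exact ht
      simp only [extractLoopA, ht2, ht, if_true, List.take_zero, List.map_nil,
        List.filter_nil, List.append_nil]
    · have ht2 : (PySem.Str.startswith (PySem.Str.strip l) "@" ||
          PySem.Str.startswith (PySem.Str.strip l) "class") = false := by
        unfold isTerminator at ht; exact Bool.eq_false_iff.mpr ht
      simp only [extractLoopA, ht2, Bool.false_eq_true, if_false, ht, Option.map]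
      by_cases hi : isImportLine (PySem.Str.strip l)
      · have hi2 : (PySem.Str.startswith (PySem.Str.strip l) "from" ||
            PySem.Str.startswith (PySem.Str.strip l) "import") = true := by
          unfold isImportLine at hi; exact hi
        rw [if_pos hi2, ih]
        cases h : rest.findIdx? isTerminator with
        | none => simp
        | some i => simp [hi]
      · have hi2 : (PySem.Str.startswith (PySem.Str.strip l) "from" ||
            PySem.Str.startswith (PySem.Str.strip l) "import") = false := by
          unfold isImportLine at hi; exact Bool.eq_false_iff.mpr hi
        rw [if_neg (ne_true_of_eq_false hi2), ih]
        cases h : rest.findIdx? isTerminator with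
        | none => simp
        | some i => simp [hi]

-- ===== VERDICT (by name: the statement is the Claim_ definition above) =====
theorem extract_constants_spec : Claim_equal_extract_constants := by
  intro cc _
  unfold Spec_extract_constants extract_constants extract_constants_alt
  rw [extractLoopA_char]
  cases h : cc.findIdx? isTerminator with
  | none => rfl
  | some i =>
    simp only [List.nil_append]
    rw [join_empty_append]
    congr 1
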